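-- pv_equiv track=rewrite | github.com/carlosdenner/academic-cv | scripts/render_latex.py | group_publications_by_type
-- ===== SOURCE A (Python) =====
-- def group_publications_by_type(publications):
--     """Group publications by type for organized display"""
--     groups = {
--         'Journal Articles': [],
--         'Conference Papers': [],
--         'Book Chapters': [],
--         'Technical Reports': [],
--         'Other': []
--     }
--
--     type_mapping = {
--         'journal-article': 'Journal Articles',
--         'proceedings-article': 'Conference Papers',
--         'book-chapter': 'Book Chapters',
--         'report': 'Technical Reports',
--         'dataset': 'Technical Reports',
--     }
--
--     for pub in publications:
--         pub_type = pub.get('type', 'other')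
--         group = type_mapping.get(pub_type, 'Other')
--         groups[group].append(pub)
--
--     # Remove empty groups
--     return {k: v for k, v in groups.items() if v}
-- ===== SOURCE B (Python) =====
-- TYPE_MAPPING = {
--     'journal-article': 'Journal Articles',
--     'proceedings-article': 'Conference Papers',
--     'book-chapter': 'Book Chapters',
--     'report': 'Technical Reports',
--     'dataset': 'Technical Reports',
-- }
--
-- CATEGORIES = ['Journal Articles', 'Conference Papers', 'Book Chapters',
--               'Technical Reports', 'Other']
--
--
-- def classify(pub):
--     return TYPE_MAPPING.get(pub.get('type', 'other'), 'Other')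
--
--
-- def group_publications_by_type(publications):
--     """Group publications by type for organized display"""
--     grouped = {c: [p for p in publications if classify(p) == c] for c in CATEGORIES}
--     return {k: v for k, v in grouped.items() if v}
-- ===== Notes on version B (the rewrite author's own statement) =====
-- stated objective: alternative
-- what changed: Replaced A's single appending pass into a mutable five-key dict by a classify helper plus a dict comprehension that builds each category as one filtering scan of the input, then drops empty categories.
import Mathlib
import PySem

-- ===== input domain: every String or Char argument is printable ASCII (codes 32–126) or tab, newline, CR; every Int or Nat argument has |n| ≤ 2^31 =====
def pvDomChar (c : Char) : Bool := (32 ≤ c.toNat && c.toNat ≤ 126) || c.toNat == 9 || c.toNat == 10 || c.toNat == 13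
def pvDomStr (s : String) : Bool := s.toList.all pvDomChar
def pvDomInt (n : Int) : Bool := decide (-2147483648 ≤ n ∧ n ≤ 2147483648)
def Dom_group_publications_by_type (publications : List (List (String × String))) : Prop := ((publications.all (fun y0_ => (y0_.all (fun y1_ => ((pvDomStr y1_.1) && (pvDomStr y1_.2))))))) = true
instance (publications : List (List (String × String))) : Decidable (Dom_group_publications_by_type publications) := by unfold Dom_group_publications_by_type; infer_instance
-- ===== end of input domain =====

-- B groups by category with one filtering scan per category instead of A's single appending pass (objective: alternative decomposition).

-- ===== PORT A =====
-- A's 'groups' dict has five fixed literal keys, so it is ported as a 5-tuple of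
-- lists; 'groups[group].append(pub)' becomes the if-chain dispatching on 'group'.
def pvTypeMapping : PySem.Dict String String :=
  PySem.Dict.ofList [("journal-article", "Journal Articles"),
                     ("proceedings-article", "Conference Papers"),
                     ("book-chapter", "Book Chapters"),
                     ("report", "Technical Reports"),
                     ("dataset", "Technical Reports")]

def group_publications_by_type (publications : List (List (String × String))) : List (String × List (List (String × String))) :=
  let groups := publications.foldl
    (fun (g : List (List (String × String)) × List (List (String × String)) × List (List (String × String)) × List (List (String × String)) × List (List (String × String))) pub =>
      let pub_type := PySem.Dict.getD (PySem.Dict.mk pub) "type" "other"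
      let group := PySem.Dict.getD pvTypeMapping pub_type "Other"
      if group == "Journal Articles" then (g.1 ++ [pub], g.2.1, g.2.2.1, g.2.2.2.1, g.2.2.2.2)
      else if group == "Conference Papers" then (g.1, g.2.1 ++ [pub], g.2.2.1, g.2.2.2.1, g.2.2.2.2)
      else if group == "Book Chapters" then (g.1, g.2.1, g.2.2.1 ++ [pub], g.2.2.2.1, g.2.2.2.2)
      else if group == "Technical Reports" then (g.1, g.2.1, g.2.2.1, g.2.2.2.1 ++ [pub], g.2.2.2.2)
      else (g.1, g.2.1, g.2.2.1, g.2.2.2.1, g.2.2.2.2 ++ [pub]))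
    ([], [], [], [], [])
  -- {k: v for k, v in groups.items() if v}
  ([("Journal Articles", groups.1), ("Conference Papers", groups.2.1),
    ("Book Chapters", groups.2.2.1), ("Technical Reports", groups.2.2.2.1),
    ("Other", groups.2.2.2.2)]).filter (fun kv => !kv.2.isEmpty)

-- ===== PORT B =====
def pvClassify (pub : List (String × String)) : String :=
  PySem.Dict.getD pvTypeMapping (PySem.Dict.getD (PySem.Dict.mk pub) "type" "other") "Other"

def pvCategories : List String :=
  ["Journal Articles", "Conference Papers", "Book Chapters", "Technical Reports", "Other"]

def group_publications_by_type_alt (publications : List (List (String × String))) : List (String × List (List (String × String))) :=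
  (pvCategories.map (fun c => (c, publications.filter (fun p => pvClassify p == c)))).filter
    (fun kv => !kv.2.isEmpty)

-- ===== PRECONDITION & SPEC =====
def Spec_group_publications_by_type (publications : List (List (String × String))) (out : List (String × List (List (String × String)))) : Prop := out = group_publications_by_type_alt publications
instance (publications : List (List (String × String))) (out : List (String × List (List (String × String)))) : Decidable (Spec_group_publications_by_type publications out) := by unfold Spec_group_publications_by_type; infer_instance

-- ===== CLAIM (what is proved, stated in full; the proofs are below) =====
def Claim_equal_group_publications_by_type : Prop := ∀ (publications : List (List (String × String))), Dom_group_publications_by_type publications → Spec_group_publications_by_type publications (group_publications_by_type publications)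

-- ===== LEMMAS AND PROOFS =====

-- A's fold, started from arbitrary accumulators, appends exactly the per-category filters.
theorem pv_fold_filter (publications : List (List (String × String)))
    (a b c d e : List (List (String × String))) :
    publications.foldl
    (fun (g : List (List (String × String)) × List (List (String × String)) × List (List (String × String)) × List (List (String × String)) × List (List (String × String))) pub =>
      let pub_type := PySem.Dict.getD (PySem.Dict.mk pub) "type" "other"
      let group := PySem.Dict.getD pvTypeMapping pub_type "Other"
      if group == "Journal Articles" then (g.1 ++ [pub], g.2.1, g.2.2.1, g.2.2.2.1, g.2.2.2.2)
      else if group == "Conference Papers" then (g.1, g.2.1 ++ [pub], g.2.2.1, g.2.2.2.1, g.2.2.2.2)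
      else if group == "Book Chapters" then (g.1, g.2.1, g.2.2.1 ++ [pub], g.2.2.2.1, g.2.2.2.2)
      else if group == "Technical Reports" then (g.1, g.2.1, g.2.2.1, g.2.2.2.1 ++ [pub], g.2.2.2.2)
      else (g.1, g.2.1, g.2.2.1, g.2.2.2.1, g.2.2.2.2 ++ [pub]))
    (a, b, c, d, e)
    = (a ++ publications.filter (fun p => pvClassify p == "Journal Articles"),
       b ++ publications.filter (fun p => pvClassify p == "Conference Papers"),
       c ++ publications.filter (fun p => pvClassify p == "Book Chapters"),
       d ++ publications.filter (fun p => pvClassify p == "Technical Reports"),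
       e ++ publications.filter (fun p => pvClassify p == "Other")) := by
  have hmk : pvTypeMapping = PySem.Dict.mk [("journal-article", "Journal Articles"),
      ("proceedings-article", "Conference Papers"), ("book-chapter", "Book Chapters"),
      ("report", "Technical Reports"), ("dataset", "Technical Reports")] := by decide
  have hE : ∀ pub : List (String × String),
      PySem.Dict.getD pvTypeMapping (PySem.Dict.getD (PySem.Dict.mk pub) "type" "other") "Other"
        = pvClassify pub := fun _ => rfl
  induction publications generalizing a b c d e with
  | nil => simp
  | cons p ps ih =>
    have h5 : pvClassify p = "Journal Articles" ∨ pvClassify p = "Conference Papers" ∨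
        pvClassify p = "Book Chapters" ∨ pvClassify p = "Technical Reports" ∨
        pvClassify p = "Other" := by
      unfold pvClassify
      rw [hmk]
      simp only [PySem.Dict.getD, PySem.Dict.get?_mk_cons]
      split_ifs <;> simp [PySem.Dict.get?]
    simp only [List.foldl_cons]
    simp only [hE, beq_iff_eq] at ih ⊢
    rcases h5 with h | h | h | h | h <;>
      simp [h, ih]

-- ===== VERDICT (by name: the statement is the Claim_ definition above) =====
theorem group_publications_by_type_spec : Claim_equal_group_publications_by_type := by
  intro publications _
  unfold Spec_group_publications_by_type group_publications_by_type group_publications_by_type_alt pvCategories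
  rw [pv_fold_filter]
  simp

-- ===== VERDICT (by name: the statement is the Claim_ definition above) =====
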